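-- pv_equiv track=rewrite | github.com/mysql/mysql-server | host_info.py | split_phases
-- ===== SOURCE A (Python) =====
-- from typing import List, Optional, Tuple
--
-- def split_phases(l: List[str]) -> Tuple[List[str], List[str], List[str]]:
--     before = []
--     during = []
--     after = []
--     for s in l:
--         if s.lower().startswith("before:"):
--             before.append(s.partition(":")[-1])
--         elif s.lower().startswith("during:"):
--             during.append(s.partition(":")[-1])
--         elif s.lower().startswith("after:"):
--             after.append(s.partition(":")[-1])
--         else:
--             before.append(s)
--     return before, during, after
-- ===== SOURCE B (Python) =====
-- from typing import List, Tuple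
--
-- def split_phases(l: List[str]) -> Tuple[List[str], List[str], List[str]]:
--     during = [s.partition(":")[-1] for s in l if s.lower().startswith("during:")]
--     after = [s.partition(":")[-1] for s in l if s.lower().startswith("after:")]
--     before = [s.partition(":")[-1] if s.lower().startswith("before:") else s
--               for s in l
--               if s.lower().startswith("before:")
--               or not (s.lower().startswith("during:") or s.lower().startswith("after:"))]
--     return before, during, after
-- ===== Notes on version B (the rewrite author's own statement) =====
-- stated objective: alternative
-- what changed: Replaces the single classifying loop with three independent filtered list comprehensions, one per result list (the before comprehension keeps transformed 'before:' items and untouched unmatched items interleaved in original order).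
import Mathlib
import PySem

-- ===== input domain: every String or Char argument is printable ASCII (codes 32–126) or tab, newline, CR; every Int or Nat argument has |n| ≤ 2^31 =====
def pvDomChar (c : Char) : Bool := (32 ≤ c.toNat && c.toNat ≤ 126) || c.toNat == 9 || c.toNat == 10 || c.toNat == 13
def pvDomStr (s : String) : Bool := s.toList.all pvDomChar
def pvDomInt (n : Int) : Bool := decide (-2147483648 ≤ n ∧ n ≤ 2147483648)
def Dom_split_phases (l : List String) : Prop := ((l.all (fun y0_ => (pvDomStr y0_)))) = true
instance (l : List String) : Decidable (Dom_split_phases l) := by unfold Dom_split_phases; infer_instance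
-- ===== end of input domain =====

-- B replaces A's single classifying loop with three independent filtered scans (same cost, different decomposition).

-- shared primitive: s.partition(":")[-1] (the part after the first ':', "" if absent)
def pyPartitionTail (s : String) : String :=
  let i := PySem.Chars.find s.toList [':']
  if i = -1 then "" else String.ofList (s.toList.drop (i.toNat + 1))

-- ===== PORT A =====
def split_phases (l : List String) : List String × List String × List String :=
  l.foldl (fun acc s =>
    if PySem.Str.startswith (PySem.Str.lower s) "before:" then
      (acc.1 ++ [pyPartitionTail s], acc.2.1, acc.2.2)
    else if PySem.Str.startswith (PySem.Str.lower s) "during:" then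
      (acc.1, acc.2.1 ++ [pyPartitionTail s], acc.2.2)
    else if PySem.Str.startswith (PySem.Str.lower s) "after:" then
      (acc.1, acc.2.1, acc.2.2 ++ [pyPartitionTail s])
    else
      (acc.1 ++ [s], acc.2.1, acc.2.2)) ([], [], [])

-- ===== PORT B =====
def split_phases_alt (l : List String) : List String × List String × List String :=
  let during := (l.filter (fun s => PySem.Str.startswith (PySem.Str.lower s) "during:")).map pyPartitionTail
  let after := (l.filter (fun s => PySem.Str.startswith (PySem.Str.lower s) "after:")).map pyPartitionTail
  let before := (l.filter (fun s =>
      PySem.Str.startswith (PySem.Str.lower s) "before:" ||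
      !(PySem.Str.startswith (PySem.Str.lower s) "during:" ||
        PySem.Str.startswith (PySem.Str.lower s) "after:"))).map
    (fun s => if PySem.Str.startswith (PySem.Str.lower s) "before:" then pyPartitionTail s else s)
  (before, during, after)

-- ===== PRECONDITION & SPEC =====
def Spec_split_phases (l : List String) (out : List String × List String × List String) : Prop := out = split_phases_alt l
instance (l : List String) (out : List String × List String × List String) : Decidable (Spec_split_phases l out) := by unfold Spec_split_phases; infer_instance

-- ===== CLAIM (what is proved, stated in full; the proofs are below) =====
def Claim_equal_split_phases : Prop := ∀ (l : List String), Dom_split_phases l → Spec_split_phases l (split_phases l)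

-- ===== LEMMAS AND PROOFS =====

-- two prefixes with different first characters cannot both be prefixes
theorem prefix_head_ne {α : Type} {c c' : α} {p p' cs : List α}
    (h : c ≠ c') (h1 : (c :: p) <+: cs) (h2 : (c' :: p') <+: cs) : False := by
  obtain ⟨t, ht⟩ := h1
  obtain ⟨t', ht'⟩ := h2
  cases cs with
  | nil => simp at ht
  | cons x xs =>
    simp only [List.cons_append, List.cons.injEq] at ht ht'
    exact h (ht.1.trans ht'.1.symm)

theorem sw_excl {cs : List Char} {c c' : Char} {p p' : List Char}
    (hne : c ≠ c')
    (h : PySem.Chars.startswith cs (c :: p) = true) :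
    PySem.Chars.startswith cs (c' :: p') = false := by
  by_contra hc
  simp only [Bool.not_eq_false] at hc
  exact prefix_head_ne hne ((PySem.Chars.startswith_iff _ _).mp h)
    ((PySem.Chars.startswith_iff _ _).mp hc)

theorem foldl_split (l : List String) (b d a : List String) :
    l.foldl (fun (acc : List String × List String × List String) s =>
      if PySem.Chars.startswith (PySem.Chars.lower s.toList) ['b','e','f','o','r','e',':'] = true then
        (acc.1 ++ [pyPartitionTail s], acc.2)
      else if PySem.Chars.startswith (PySem.Chars.lower s.toList) ['d','u','r','i','n','g',':'] = true then
        (acc.1, acc.2.1 ++ [pyPartitionTail s], acc.2.2)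
      else if PySem.Chars.startswith (PySem.Chars.lower s.toList) ['a','f','t','e','r',':'] = true then
        (acc.1, acc.2.1, acc.2.2 ++ [pyPartitionTail s])
      else
        (acc.1 ++ [s], acc.2)) (b, d, a) =
    (b ++ (split_phases_alt l).1, d ++ (split_phases_alt l).2.1, a ++ (split_phases_alt l).2.2) := by
  induction l generalizing b d a with
  | nil => simp [split_phases_alt]
  | cons s t ih =>
    by_cases h1 : PySem.Chars.startswith (PySem.Chars.lower s.toList) ['b','e','f','o','r','e',':'] = true
    · have h2 := sw_excl (cs := PySem.Chars.lower s.toList) (c := 'b') (c' := 'd')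
        (p' := ['u','r','i','n','g',':']) (by decide) h1
      have h3 := sw_excl (cs := PySem.Chars.lower s.toList) (c := 'b') (c' := 'a')
        (p' := ['f','t','e','r',':']) (by decide) h1
      simp [split_phases_alt, h1, h2, h3, ih]
    · by_cases h2 : PySem.Chars.startswith (PySem.Chars.lower s.toList) ['d','u','r','i','n','g',':'] = true
      · have h3 := sw_excl (cs := PySem.Chars.lower s.toList) (c := 'd') (c' := 'a')
          (p' := ['f','t','e','r',':']) (by decide) h2
        simp [split_phases_alt, h1, h2, h3, ih]
      · by_cases h3 : PySem.Chars.startswith (PySem.Chars.lower s.toList) ['a','f','t','e','r',':'] = true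
        · simp [split_phases_alt, h1, h2, h3, ih]
        · simp [split_phases_alt, h1, h2, h3, ih]

-- ===== VERDICT (by name: the statement is the Claim_ definition above) =====
theorem split_phases_spec : Claim_equal_split_phases := by
  intro l _
  unfold Spec_split_phases split_phases
  simp only [PySem.Str.startswith_eq, PySem.Str.toList_lower]
  rw [show ("before:".toList) = ['b','e','f','o','r','e',':'] from by decide,
      show ("during:".toList) = ['d','u','r','i','n','g',':'] from by decide,
      show ("after:".toList) = ['a','f','t','e','r',':'] from by decide]
  rw [foldl_split]
  simp
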